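-- pv_equiv track=rewrite | github.com/ansh2909-jain/codes | 100Q.py | modify_matrix
-- ===== SOURCE A (Python) =====
-- def modify_matrix(mat,n,m):
--     rows_to_update = [False] * n
--     cols_to_update = [False] * m
--     for i in range(n):
--         for j in range(m):
--             if mat [i][j] == 1:
--                 rows_to_update[i] = True
--                 cols_to_update[j] = True
--     for i in range(n):
--         for j in range(m):
--             if rows_to_update[i] or cols_to_update[j]:
--                 mat[i][j] = 1
--     return mat
-- ===== SOURCE B (Python) =====
-- def modify_matrix(mat, n, m):
--     # Classic constant-extra-space algorithm: the matrix's own first row and first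
--     # column serve as the marker store (a marker 1 is itself a correct final value),
--     # with the first row/column's own state remembered in two booleans beforehand.
--     if n <= 0 or m <= 0:
--         return mat
--     first_row_has = any(mat[0][j] == 1 for j in range(m))
--     first_col_has = any(mat[i][0] == 1 for i in range(n))
--     for i in range(1, n):
--         for j in range(1, m):
--             if mat[i][j] == 1:
--                 mat[i][0] = 1
--                 mat[0][j] = 1
--     for i in range(1, n):
--         for j in range(1, m):
--             if mat[i][0] == 1 or mat[0][j] == 1:
--                 mat[i][j] = 1
--     if first_row_has:
--         for j in range(m):
--             mat[0][j] = 1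
--     if first_col_has:
--         for i in range(n):
--             mat[i][0] = 1
--     return mat
-- ===== Notes on version B (the rewrite author's own statement) =====
-- stated objective: alternative
-- what changed: B replaces A's auxiliary boolean flag arrays with the classic constant-extra-space technique: it stores the markers in the matrix's own first row and first column (a marker 1 is already a correct final value), remembers the first row/column's original state in two booleans, rewrites only the interior from those in-matrix markers, and finally fills the first row/column if needed.
import Mathlib
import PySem

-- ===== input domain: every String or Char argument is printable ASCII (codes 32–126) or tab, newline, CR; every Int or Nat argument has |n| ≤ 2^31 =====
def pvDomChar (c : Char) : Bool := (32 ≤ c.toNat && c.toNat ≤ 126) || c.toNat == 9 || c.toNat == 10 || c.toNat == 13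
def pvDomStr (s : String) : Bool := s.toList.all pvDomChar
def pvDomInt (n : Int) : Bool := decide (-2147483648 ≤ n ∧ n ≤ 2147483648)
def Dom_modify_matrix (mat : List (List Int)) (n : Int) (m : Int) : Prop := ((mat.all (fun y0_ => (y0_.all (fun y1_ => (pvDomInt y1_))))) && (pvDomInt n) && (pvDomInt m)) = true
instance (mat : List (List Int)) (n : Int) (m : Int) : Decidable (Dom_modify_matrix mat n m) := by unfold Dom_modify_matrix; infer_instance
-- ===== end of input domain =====

-- B replaces A's auxiliary row/column flag arrays by the classic constant-extra-space
-- technique (markers stored in the matrix's own first row and first column, two booleans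
-- for the first row/column themselves, final fill passes); same return value AND the same
-- in-place mutation of mat as A on Pre_.


-- ===== PORT A =====
-- range(n)/range(m) iterate the non-negative indices 0..n-1, ported as List.range n.toNat
-- (empty for n ≤ 0, exactly like Python's range); mat[i][j] for these in-range non-negative
-- indices is List.getD (out-of-range access raises in Python and is excluded by Pre_).
def modify_matrix (mat : List (List Int)) (n : Int) (m : Int) : List (List Int) :=
  let rows0 : List Bool := List.replicate n.toNat false
  let cols0 : List Bool := List.replicate m.toNat false
  let rc :=
    (List.range n.toNat).foldl (fun rc i =>
      (List.range m.toNat).foldl (fun rc j =>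
        if ((mat.getD i []).getD j 0) == 1 then (rc.1.set i true, rc.2.set j true) else rc) rc)
      (rows0, cols0)
  (List.range n.toNat).foldl (fun acc i =>
    (List.range m.toNat).foldl (fun acc j =>
      if rc.1.getD i false || rc.2.getD j false then acc.set i ((acc.getD i []).set j 1) else acc) acc) mat

-- ===== PORT B =====
-- Python range(1, n) = List.range' 1 (n.toNat - 1) (here n.toNat ≥ 1); the two sequential
-- statements mat[i][0] = 1; mat[0][j] = 1 become two successive List.set updates.
def modify_matrix_alt (mat : List (List Int)) (n : Int) (m : Int) : List (List Int) :=
  if n ≤ 0 || m ≤ 0 then mat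
  else
    let N := n.toNat
    let M := m.toNat
    let firstRowHas := (List.range M).any (fun j => (mat.getD 0 []).getD j 0 == 1)
    let firstColHas := (List.range N).any (fun i => (mat.getD i []).getD 0 0 == 1)
    let mk := (List.range' 1 (N - 1)).foldl (fun acc i =>
      (List.range' 1 (M - 1)).foldl (fun acc j =>
        if (acc.getD i []).getD j 0 == 1 then
          let acc1 := acc.set i ((acc.getD i []).set 0 1)
          acc1.set 0 ((acc1.getD 0 []).set j 1)
        else acc) acc) mat
    let wr := (List.range' 1 (N - 1)).foldl (fun acc i =>
      (List.range' 1 (M - 1)).foldl (fun acc j =>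
        if (acc.getD i []).getD 0 0 == 1 || (acc.getD 0 []).getD j 0 == 1 then
          acc.set i ((acc.getD i []).set j 1)
        else acc) acc) mk
    let r0 := if firstRowHas then (List.range M).foldl (fun acc j => acc.set 0 ((acc.getD 0 []).set j 1)) wr else wr
    if firstColHas then (List.range N).foldl (fun acc i => acc.set i ((acc.getD i []).set 0 1)) r0 else r0

-- ===== PRECONDITION & SPEC =====
-- Exactly the inputs where Python A returns: when n > 0 and m > 0 it reads mat[i][j] for all
-- i < n, j < m, so it raises IndexError iff n > len(mat) or one of the first n rows is shorter
-- than m; otherwise (n ≤ 0 or m ≤ 0) it never indexes and returns normally.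
def Pre_modify_matrix (mat : List (List Int)) (n : Int) (m : Int) : Prop :=
  0 < n → 0 < m → (n ≤ (mat.length : Int) ∧ ∀ row ∈ mat.take n.toNat, m ≤ (row.length : Int))
instance (mat : List (List Int)) (n : Int) (m : Int) : Decidable (Pre_modify_matrix mat n m) := by
  unfold Pre_modify_matrix; infer_instance
def pvWitness_modify_matrix : List (List Int) × Int × Int := ([[0, 1], [0, 0]], 2, 2)

def Spec_modify_matrix (mat : List (List Int)) (n : Int) (m : Int) (out : List (List Int)) : Prop := out = modify_matrix_alt mat n m
instance (mat : List (List Int)) (n : Int) (m : Int) (out : List (List Int)) : Decidable (Spec_modify_matrix mat n m out) := by unfold Spec_modify_matrix; infer_instance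

-- ===== CLAIM (what is proved, stated in full; the proofs are below) =====
def Claim_equal_modify_matrix : Prop := ∀ (mat : List (List Int)) (n : Int) (m : Int), Dom_modify_matrix mat n m → Pre_modify_matrix mat n m → Spec_modify_matrix mat n m (modify_matrix mat n m)

-- ===== LEMMAS AND PROOFS =====

-- the value of cell (r, c) of a matrix, total via defaults
def pvCell (acc : List (List Int)) (r c : Nat) : Int := (acc.getD r []).getD c 0

theorem pv_cell_def (acc : List (List Int)) (r c : Nat) :
    (acc.getD r []).getD c 0 = pvCell acc r c := rfl

-- getD after set, fully general
theorem pv_getD_set {α : Type} (l : List α) (k t : Nat) (a d : α) :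
    (l.set k a).getD t d = if t = k ∧ k < l.length then a else l.getD t d := by
  simp only [List.getD_eq_getElem?_getD, List.getElem?_set]
  split_ifs with h1 h2 h3 h4 <;> simp_all

-- a single guarded cell write, cellwise
theorem pv_cell_set (acc : List (List Int)) (a b : Nat) (v : Int) (r c : Nat) :
    pvCell (acc.set a ((acc.getD a []).set b v)) r c
      = if r = a ∧ a < acc.length ∧ c = b ∧ b < (acc.getD a []).length then v
        else pvCell acc r c := by
  unfold pvCell
  rw [pv_getD_set]
  by_cases h1 : r = a ∧ a < acc.length
  · rw [if_pos h1]
    rcases h1 with ⟨hr, ha⟩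
    subst hr
    rw [pv_getD_set]
    by_cases h2 : c = b ∧ b < (acc.getD r []).length
    · rw [if_pos h2, if_pos ⟨rfl, ha, h2.1, h2.2⟩]
    · rw [if_neg h2, if_neg (by tauto)]
  · rw [if_neg h1, if_neg (by tauto)]

theorem pv_rowlen_set (acc : List (List Int)) (a b : Nat) (v : Int) (r : Nat) :
    ((acc.set a ((acc.getD a []).set b v)).getD r []).length = (acc.getD r []).length := by
  rw [pv_getD_set]
  split_ifs with h
  · rcases h with ⟨hr, _⟩; subst hr; simp
  · rfl

-- shape (outer length and every row length) is preserved by any shape-preserving fold step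
theorem pv_foldl_shape {β : Type} (s : List (List Int) → β → List (List Int))
    (hs : ∀ acc p, (s acc p).length = acc.length ∧
          ∀ r, ((s acc p).getD r []).length = (acc.getD r []).length) :
    ∀ (ps : List β) (acc : List (List Int)),
      (ps.foldl s acc).length = acc.length ∧
      ∀ r, ((ps.foldl s acc).getD r []).length = (acc.getD r []).length := by
  intro ps
  induction ps with
  | nil => intro acc; exact ⟨rfl, fun r => rfl⟩
  | cons p t ih =>
    intro acc
    simp only [List.foldl_cons]
    exact ⟨(ih (s acc p)).1.trans (hs acc p).1,
      fun r => ((ih (s acc p)).2 r).trans ((hs acc p).2 r)⟩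

-- a nested fold over two index ranges is a fold over the flattened pair list
theorem pv_foldl_pairs {α : Type} (F : α → Nat × Nat → α) (I J : List Nat) (a : α) :
    I.foldl (fun acc i => J.foldl (fun acc j => F acc (i, j)) acc) a
      = (I.flatMap (fun i => J.map (Prod.mk i))).foldl F a := by
  induction I generalizing a with
  | nil => simp
  | cons i I ih => simp [List.flatMap_cons, List.foldl_append, List.foldl_map, ih]

-- a fold of guarded single-cell writes (condition independent of the accumulator), cellwise
theorem pv_cellwrite (cond : Nat × Nat → Bool) :
    ∀ (ps : List (Nat × Nat)) (acc : List (List Int)) (r c : Nat),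
      pvCell (ps.foldl (fun acc p =>
          if cond p then acc.set p.1 ((acc.getD p.1 []).set p.2 1) else acc) acc) r c
      = if (∃ p ∈ ps, cond p = true ∧ p.1 = r ∧ p.2 = c) ∧ r < acc.length ∧ c < (acc.getD r []).length
        then 1 else pvCell acc r c := by
  intro ps
  induction ps with
  | nil => intro acc r c; simp
  | cons p t ih =>
    intro acc r c
    simp only [List.foldl_cons]
    by_cases hc : cond p = true
    · rw [if_pos hc, ih]
      have h1 : (acc.set p.1 ((acc.getD p.1 []).set p.2 1)).length = acc.length := by simp
      have h2 : ((acc.set p.1 ((acc.getD p.1 []).set p.2 1)).getD r []).length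
          = (acc.getD r []).length := pv_rowlen_set acc p.1 p.2 1 r
      rw [h1, h2, pv_cell_set]
      by_cases hEt : (∃ q ∈ t, cond q = true ∧ q.1 = r ∧ q.2 = c) ∧ r < acc.length ∧ c < (acc.getD r []).length
      · rw [if_pos hEt]
        obtain ⟨⟨q, hq, hq2⟩, hb⟩ := hEt
        rw [if_pos ⟨⟨q, List.mem_cons_of_mem _ hq, hq2⟩, hb⟩]
      · rw [if_neg hEt]
        by_cases hH : r = p.1 ∧ p.1 < acc.length ∧ c = p.2 ∧ p.2 < (acc.getD p.1 []).length
        · obtain ⟨e1, hb1, e2, hb2⟩ := hH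
          rw [if_pos ⟨e1, hb1, e2, hb2⟩,
            if_pos ⟨⟨p, List.mem_cons_self, hc, e1.symm, e2.symm⟩, e1 ▸ hb1, by rw [e1, e2]; exact hb2⟩]
        · rw [if_neg hH, if_neg ?_]
          rintro ⟨⟨q, hq, hcnd, hq1, hq2⟩, hb1, hb2⟩
          rcases List.mem_cons.mp hq with rfl | hq'
          · exact hH ⟨hq1.symm, hq1 ▸ hb1, hq2.symm, by rw [hq1, hq2]; exact hb2⟩
          · exact hEt ⟨⟨q, hq', hcnd, hq1, hq2⟩, hb1, hb2⟩
    · rw [if_neg hc, ih]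
      have hiff : ((∃ q ∈ p :: t, cond q = true ∧ q.1 = r ∧ q.2 = c) ↔ (∃ q ∈ t, cond q = true ∧ q.1 = r ∧ q.2 = c)) := by
        constructor
        · rintro ⟨q, hq, hcnd, h⟩
          rcases List.mem_cons.mp hq with rfl | hq'
          · exact absurd hcnd hc
          · exact ⟨q, hq', hcnd, h⟩
        · rintro ⟨q, hq, h⟩
          exact ⟨q, List.mem_cons_of_mem _ hq, h⟩
      exact if_congr (and_congr_left' hiff.symm) rfl rfl

theorem pv_cell_mark (acc : List (List Int)) (i j : Nat) (hi : 1 ≤ i) (r c : Nat) :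
    pvCell ((acc.set i ((acc.getD i []).set 0 1)).set 0
              (((acc.set i ((acc.getD i []).set 0 1)).getD 0 []).set j 1)) r c
      = if r = 0 ∧ 0 < acc.length ∧ c = j ∧ j < (acc.getD 0 []).length then 1
        else if r = i ∧ i < acc.length ∧ c = 0 ∧ 0 < (acc.getD i []).length then 1
        else pvCell acc r c := by
  have hget0 : (acc.set i ((acc.getD i []).set 0 1)).getD 0 [] = acc.getD 0 [] := by
    rw [pv_getD_set, if_neg (by rintro ⟨h, _⟩; omega)]
  rw [pv_cell_set, hget0, pv_cell_set]
  simp only [List.length_set]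

-- a fold of guarded marker double writes (condition independent of the accumulator), cellwise
theorem pv_markwrite (cond : Nat × Nat → Bool) :
    ∀ (ps : List (Nat × Nat)), (∀ p ∈ ps, 1 ≤ p.1 ∧ 1 ≤ p.2) →
    ∀ (acc : List (List Int)) (r c : Nat),
      pvCell (ps.foldl (fun acc p =>
          if cond p then
            (acc.set p.1 ((acc.getD p.1 []).set 0 1)).set 0
              (((acc.set p.1 ((acc.getD p.1 []).set 0 1)).getD 0 []).set p.2 1)
          else acc) acc) r c
      = if ((∃ p ∈ ps, cond p = true ∧ p.1 = r) ∧ c = 0 ∧ r < acc.length ∧ 0 < (acc.getD r []).length)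
          ∨ ((∃ p ∈ ps, cond p = true ∧ p.2 = c) ∧ r = 0 ∧ 0 < acc.length ∧ c < (acc.getD 0 []).length)
        then 1 else pvCell acc r c := by
  intro ps
  induction ps with
  | nil => intro _ acc r c; simp
  | cons p t ih =>
    intro hps acc r c
    have hp := hps p List.mem_cons_self
    have hps' := fun q hq => hps q (List.mem_cons_of_mem _ hq)
    simp only [List.foldl_cons]
    by_cases hc : cond p = true
    · rw [if_pos hc]
      set acc1 := acc.set p.1 ((acc.getD p.1 []).set 0 1) with hacc1
      set acc2 := acc1.set 0 ((acc1.getD 0 []).set p.2 1) with hacc2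
      have hlen : acc2.length = acc.length := by rw [hacc2, hacc1]; simp
      have hrow : ∀ r, (acc2.getD r []).length = (acc.getD r []).length := by
        intro r
        rw [hacc2, hacc1, pv_rowlen_set, pv_rowlen_set]
      rw [ih hps', hlen, hrow, hrow]
      have hmark := pv_cell_mark acc p.1 p.2 hp.1 r c
      rw [← hacc1, ← hacc2] at hmark
      rw [hmark]
      by_cases hDt : ((∃ q ∈ t, cond q = true ∧ q.1 = r) ∧ c = 0 ∧ r < acc.length ∧ 0 < (acc.getD r []).length)
          ∨ ((∃ q ∈ t, cond q = true ∧ q.2 = c) ∧ r = 0 ∧ 0 < acc.length ∧ c < (acc.getD 0 []).length)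
      · rw [if_pos hDt]
        rcases hDt with ⟨⟨q, hq, hq2⟩, hb⟩ | ⟨⟨q, hq, hq2⟩, hb⟩
        · rw [if_pos (Or.inl ⟨⟨q, List.mem_cons_of_mem _ hq, hq2⟩, hb⟩)]
        · rw [if_pos (Or.inr ⟨⟨q, List.mem_cons_of_mem _ hq, hq2⟩, hb⟩)]
      · rw [if_neg hDt]
        by_cases hH1 : r = 0 ∧ 0 < acc.length ∧ c = p.2 ∧ p.2 < (acc.getD 0 []).length
        · obtain ⟨e1, hb1, e2, hb2⟩ := hH1
          rw [if_pos ⟨e1, hb1, e2, hb2⟩,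
            if_pos (Or.inr ⟨⟨p, List.mem_cons_self, hc, e2.symm⟩, e1, hb1, e2 ▸ hb2⟩)]
        · rw [if_neg hH1]
          by_cases hH2 : r = p.1 ∧ p.1 < acc.length ∧ c = 0 ∧ 0 < (acc.getD p.1 []).length
          · obtain ⟨e1, hb1, e2, hb2⟩ := hH2
            rw [if_pos ⟨e1, hb1, e2, hb2⟩,
              if_pos (Or.inl ⟨⟨p, List.mem_cons_self, hc, e1.symm⟩, e2, e1 ▸ hb1, by rw [e1]; exact hb2⟩)]
          · rw [if_neg hH2, if_neg ?_]
            rintro (⟨⟨q, hq, hcnd, hq1⟩, e0, hb1, hb2⟩ | ⟨⟨q, hq, hcnd, hq1⟩, e0, hb1, hb2⟩)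
            · rcases List.mem_cons.mp hq with rfl | hq'
              · exact hH2 ⟨hq1.symm, hq1 ▸ hb1, e0, by rw [hq1]; exact hb2⟩
              · exact hDt (Or.inl ⟨⟨q, hq', hcnd, hq1⟩, e0, hb1, hb2⟩)
            · rcases List.mem_cons.mp hq with rfl | hq'
              · exact hH1 ⟨e0, hb1, hq1.symm, hq1 ▸ hb2⟩
              · exact hDt (Or.inr ⟨⟨q, hq', hcnd, hq1⟩, e0, hb1, hb2⟩)
    · rw [if_neg hc, ih hps']
      have hiff : (((∃ q ∈ p :: t, cond q = true ∧ q.1 = r) ∧ c = 0 ∧ r < acc.length ∧ 0 < (acc.getD r []).length)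
          ∨ ((∃ q ∈ p :: t, cond q = true ∧ q.2 = c) ∧ r = 0 ∧ 0 < acc.length ∧ c < (acc.getD 0 []).length))
        ↔ (((∃ q ∈ t, cond q = true ∧ q.1 = r) ∧ c = 0 ∧ r < acc.length ∧ 0 < (acc.getD r []).length)
          ∨ ((∃ q ∈ t, cond q = true ∧ q.2 = c) ∧ r = 0 ∧ 0 < acc.length ∧ c < (acc.getD 0 []).length)) := by
        constructor
        · rintro (⟨⟨q, hq, hcnd, hq1⟩, hrest⟩ | ⟨⟨q, hq, hcnd, hq1⟩, hrest⟩)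
          · rcases List.mem_cons.mp hq with rfl | hq'
            · exact absurd hcnd hc
            · exact Or.inl ⟨⟨q, hq', hcnd, hq1⟩, hrest⟩
          · rcases List.mem_cons.mp hq with rfl | hq'
            · exact absurd hcnd hc
            · exact Or.inr ⟨⟨q, hq', hcnd, hq1⟩, hrest⟩
        · rintro (⟨⟨q, hq, h⟩, hrest⟩ | ⟨⟨q, hq, h⟩, hrest⟩)
          · exact Or.inl ⟨⟨q, List.mem_cons_of_mem _ hq, h⟩, hrest⟩
          · exact Or.inr ⟨⟨q, List.mem_cons_of_mem _ hq, h⟩, hrest⟩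
      exact if_congr hiff.symm rfl rfl

-- the marker pass reads only interior cells (both indices ≥ 1) and writes none of them,
-- so its accumulator-dependent condition can be replaced by the one on the original matrix
theorem pv_mark_stable (mat : List (List Int)) :
    ∀ (ps : List (Nat × Nat)), (∀ p ∈ ps, 1 ≤ p.1 ∧ 1 ≤ p.2) →
    ∀ (acc : List (List Int)),
      (∀ r c, 1 ≤ r → 1 ≤ c → (acc.getD r []).getD c 0 = (mat.getD r []).getD c 0) →
      ps.foldl (fun acc p =>
          if (acc.getD p.1 []).getD p.2 0 == 1 then
            (acc.set p.1 ((acc.getD p.1 []).set 0 1)).set 0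
              (((acc.set p.1 ((acc.getD p.1 []).set 0 1)).getD 0 []).set p.2 1)
          else acc) acc
      = ps.foldl (fun acc p =>
          if (mat.getD p.1 []).getD p.2 0 == 1 then
            (acc.set p.1 ((acc.getD p.1 []).set 0 1)).set 0
              (((acc.set p.1 ((acc.getD p.1 []).set 0 1)).getD 0 []).set p.2 1)
          else acc) acc := by
  intro ps
  induction ps with
  | nil => intro _ acc _; rfl
  | cons p t ih =>
    intro hps acc hinv
    have hp := hps p List.mem_cons_self
    simp only [List.foldl_cons]
    rw [hinv p.1 p.2 hp.1 hp.2]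
    refine ih (fun q hq => hps q (List.mem_cons_of_mem _ hq)) _ (fun r c hr hc => ?_)
    by_cases hcnd : ((mat.getD p.1 []).getD p.2 0 == 1) = true
    · rw [if_pos hcnd]
      show pvCell ((acc.set p.1 ((acc.getD p.1 []).set 0 1)).set 0
        (((acc.set p.1 ((acc.getD p.1 []).set 0 1)).getD 0 []).set p.2 1)) r c = pvCell mat r c
      rw [pv_cell_mark acc p.1 p.2 hp.1 r c,
        if_neg (by rintro ⟨h, _⟩; omega), if_neg (by rintro ⟨_, _, h, _⟩; omega)]
      exact hinv r c hr hc
    · rw [if_neg hcnd]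
      exact hinv r c hr hc

-- the write pass reads only first-row/first-column cells and writes only interior cells,
-- so its accumulator-dependent condition can be replaced by the one on its start matrix mk
theorem pv_wr_stable (mk : List (List Int)) :
    ∀ (ps : List (Nat × Nat)), (∀ p ∈ ps, 1 ≤ p.1 ∧ 1 ≤ p.2) →
    ∀ (acc : List (List Int)),
      (∀ r, (acc.getD r []).getD 0 0 = (mk.getD r []).getD 0 0) →
      (∀ c, (acc.getD 0 []).getD c 0 = (mk.getD 0 []).getD c 0) →
      ps.foldl (fun acc p =>
          if (acc.getD p.1 []).getD 0 0 == 1 || (acc.getD 0 []).getD p.2 0 == 1 then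
            acc.set p.1 ((acc.getD p.1 []).set p.2 1)
          else acc) acc
      = ps.foldl (fun acc p =>
          if (mk.getD p.1 []).getD 0 0 == 1 || (mk.getD 0 []).getD p.2 0 == 1 then
            acc.set p.1 ((acc.getD p.1 []).set p.2 1)
          else acc) acc := by
  intro ps
  induction ps with
  | nil => intro _ acc _ _; rfl
  | cons p t ih =>
    intro hps acc hinv0 hinv1
    have hp := hps p List.mem_cons_self
    simp only [List.foldl_cons]
    rw [hinv0 p.1, hinv1 p.2]
    refine ih (fun q hq => hps q (List.mem_cons_of_mem _ hq)) _ ?_ ?_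
    · intro r
      by_cases hcnd : ((mk.getD p.1 []).getD 0 0 == 1 || (mk.getD 0 []).getD p.2 0 == 1) = true
      · rw [if_pos hcnd]
        show pvCell (acc.set p.1 ((acc.getD p.1 []).set p.2 1)) r 0 = (mk.getD r []).getD 0 0
        rw [pv_cell_set, if_neg (by rintro ⟨_, _, h, _⟩; omega)]
        exact hinv0 r
      · rw [if_neg hcnd]; exact hinv0 r
    · intro c
      by_cases hcnd : ((mk.getD p.1 []).getD 0 0 == 1 || (mk.getD 0 []).getD p.2 0 == 1) = true
      · rw [if_pos hcnd]
        show pvCell (acc.set p.1 ((acc.getD p.1 []).set p.2 1)) 0 c = (mk.getD 0 []).getD c 0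
        rw [pv_cell_set, if_neg (by rintro ⟨h, _⟩; omega)]
        exact hinv1 c
      · rw [if_neg hcnd]; exact hinv1 c

-- splitting any over range K (K ≥ 1) at index 0
theorem pv_range_any_split (K : Nat) (h : 1 ≤ K) (f : Nat → Bool) :
    (List.range K).any f = (f 0 || (List.range' 1 (K - 1)).any f) := by
  obtain ⟨k, rfl⟩ : ∃ k, K = k + 1 := ⟨K - 1, by omega⟩
  rw [List.range_eq_range', List.range'_succ]
  simp

-- two matrices with equal cells and equal shape are equal
theorem pv_eq_of_cell (X Y : List (List Int)) (hlen : X.length = Y.length)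
    (hrow : ∀ r, (X.getD r []).length = (Y.getD r []).length)
    (hcell : ∀ r c, pvCell X r c = pvCell Y r c) : X = Y := by
  apply List.ext_getElem hlen
  intro i h1 h2
  have e1 : X[i]? = some X[i] := List.getElem?_eq_getElem h1
  have e2 : Y[i]? = some Y[i] := List.getElem?_eq_getElem h2
  apply List.ext_getElem
  · have := hrow i
    simp only [List.getD_eq_getElem?_getD, e1, e2, Option.getD_some] at this
    exact this
  · intro j hj1 hj2
    have e3 : X[i][j]? = some (X[i][j]) := List.getElem?_eq_getElem hj1
    have e4 : Y[i][j]? = some (Y[i][j]) := List.getElem?_eq_getElem hj2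
    have := hcell i j
    simp only [pvCell, List.getD_eq_getElem?_getD, e1, e2, Option.getD_some, e3, e4] at this
    exact this

theorem pv_foldl_set_length {α : Type} (v : α) (cond : Nat → Bool) (l : List Nat) :
    ∀ (c : List α), (l.foldl (fun c j => if cond j then c.set j v else c) c).length = c.length := by
  induction l with
  | nil => intro c; rfl
  | cons x t ih => intro c; simp only [List.foldl_cons]; rw [ih]; split <;> simp

theorem pv_foldl_setTrue_getD (g : Nat → Bool) :
    ∀ (M : Nat) (c : List Bool) (t : Nat),
      ((List.range M).foldl (fun c j => if g j then c.set j true else c) c).getD t false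
        = (c.getD t false || (decide (t < M) && g t && decide (t < c.length))) := by
  intro M
  induction M with
  | zero => intro c t; simp
  | succ M ih =>
    intro c t
    rw [List.range_succ, List.foldl_append, List.foldl_cons, List.foldl_nil]
    by_cases hg : g M
    · rw [if_pos hg, pv_getD_set, pv_foldl_set_length, ih]
      by_cases ht : t = M
      · subst ht
        by_cases hl : t < c.length <;> simp [hl, hg]
      · have h1 : (t ≤ M) ↔ (t < M) := by omega
        simp [ht, h1]
    · rw [if_neg hg, ih]
      by_cases ht : t = M
      · subst ht; simp [hg]
      · have h1 : (t ≤ M) ↔ (t < M) := by omega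
        simp [h1]

theorem pv_inner_pair (gi : Nat → Bool) :
    ∀ (M : Nat) (i : Nat) (r c : List Bool),
      (List.range M).foldl (fun rc j => if gi j then (rc.1.set i true, rc.2.set j true) else rc) (r, c)
        = ((if (List.range M).any gi then r.set i true else r),
           (List.range M).foldl (fun c j => if gi j then c.set j true else c) c) := by
  intro M
  induction M with
  | zero => intro i r c; simp
  | succ M ih =>
    intro i r c
    rw [List.range_succ, List.foldl_append, List.foldl_append, List.foldl_cons, List.foldl_nil,
      List.foldl_cons, List.foldl_nil, ih]
    by_cases hg : gi M
    · simp only [hg, if_true]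
      by_cases ha : (List.range M).any gi
      · simp [ha, hg, List.any_append, List.set_set]
      · simp [ha, hg, List.any_append]
    · simp [hg, List.any_append]

theorem pv_foldl_prod {α β γ : Type} (f : α → γ → α) (h : β → γ → β) :
    ∀ (l : List γ) (a : α) (b : β),
      l.foldl (fun p x => (f p.1 x, h p.2 x)) (a, b) = (l.foldl f a, l.foldl h b) := by
  intro l
  induction l with
  | nil => intro a b; rfl
  | cons x t ih => intro a b; simp [ih]

theorem pv_nested_col_length (g : Nat → Nat → Bool) (M : Nat) :
    ∀ (N : Nat) (c : List Bool),
      ((List.range N).foldl (fun c i => (List.range M).foldl (fun c j => if g i j then c.set j true else c) c) c).length = c.length := by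
  intro N
  induction N with
  | zero => intro c; rfl
  | succ N ih =>
    intro c
    rw [List.range_succ, List.foldl_append, List.foldl_cons, List.foldl_nil,
      pv_foldl_set_length, ih]

theorem pv_nested_col_getD (g : Nat → Nat → Bool) (M : Nat) :
    ∀ (N : Nat) (c : List Bool) (t : Nat),
      ((List.range N).foldl (fun c i => (List.range M).foldl (fun c j => if g i j then c.set j true else c) c) c).getD t false
        = (c.getD t false || (decide (t < M) && (List.range N).any (fun i => g i t) && decide (t < c.length))) := by
  intro N
  induction N with
  | zero => intro c t; simp
  | succ N ih =>
    intro c t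
    rw [List.range_succ, List.foldl_append, List.foldl_cons, List.foldl_nil,
      pv_foldl_setTrue_getD, ih]
    rw [pv_nested_col_length, List.any_append]
    by_cases h1 : t < M <;> by_cases h2 : t < c.length <;>
      by_cases h3 : g N t <;> simp [h1, h2, h3]


-- membership in the flattened pair list
theorem pv_mem_pairs (I J : List Nat) (p : Nat × Nat) :
    p ∈ I.flatMap (fun i => J.map (Prod.mk i)) ↔ p.1 ∈ I ∧ p.2 ∈ J := by
  constructor
  · intro hp
    obtain ⟨i, hi, hj⟩ := List.mem_flatMap.mp hp
    obtain ⟨j, hjJ, rfl⟩ := List.mem_map.mp hj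
    exact ⟨hi, hjJ⟩
  · rintro ⟨h1, h2⟩
    exact List.mem_flatMap.mpr ⟨p.1, h1, List.mem_map.mpr ⟨p.2, h2, rfl⟩⟩

-- bounded existentials over the flattened pair list
theorem pv_exists_pairs (I J : List Nat) (C : Nat × Nat → Prop) :
    (∃ p ∈ I.flatMap (fun i => J.map (Prod.mk i)), C p) ↔ ∃ i ∈ I, ∃ j ∈ J, C (i, j) := by
  constructor
  · rintro ⟨p, hp, hC⟩
    obtain ⟨h1, h2⟩ := (pv_mem_pairs I J p).mp hp
    exact ⟨p.1, h1, p.2, h2, hC⟩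
  · rintro ⟨i, hi, j, hj, hC⟩
    exact ⟨(i, j), (pv_mem_pairs I J (i, j)).mpr ⟨hi, hj⟩, hC⟩

-- every index pair of the interior pair list has both components ≥ 1
theorem pv_pairs_interior (N M : Nat) :
    ∀ p ∈ (List.range' 1 (N - 1)).flatMap (fun i => (List.range' 1 (M - 1)).map (Prod.mk i)),
      1 ≤ p.1 ∧ 1 ≤ p.2 := by
  intro p hp
  obtain ⟨h1, h2⟩ := (pv_mem_pairs _ _ p).mp hp
  exact ⟨(List.mem_range'_1.mp h1).1, (List.mem_range'_1.mp h2).1⟩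

-- collapsing a tower of ifs with equal 'then' branches
theorem pv_ite_or (A B : Prop) [Decidable A] [Decidable B] (v w : Int) :
    (if A then w else if B then w else v) = if A ∨ B then w else v := by
  by_cases hA : A <;> by_cases hB : B <;> simp [hA, hB]

-- ===== characterizations of A's two phases =====
theorem pv_A_shape (mat : List (List Int)) (n m : Int) :
    (modify_matrix mat n m).length = mat.length ∧
    ∀ r, ((modify_matrix mat n m).getD r []).length = (mat.getD r []).length := by
  unfold modify_matrix
  dsimp only
  refine pv_foldl_shape _ ?_ _ _
  intro acc i
  refine pv_foldl_shape _ ?_ _ _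
  intro acc j
  constructor
  · split
    · simp
    · rfl
  · intro r
    split
    · exact pv_rowlen_set acc i j 1 r
    · rfl

theorem pv_A_cell (mat : List (List Int)) (n m : Int) (_hn : 0 < n) (_hm : 0 < m)
    (hNlen : n.toNat ≤ mat.length)
    (hrowlen : ∀ r, r < n.toNat → m.toNat ≤ (mat.getD r []).length) :
    ∀ r c, pvCell (modify_matrix mat n m) r c
      = if r < n.toNat ∧ c < m.toNat ∧
           (((List.range m.toNat).any (fun j => pvCell mat r j == 1))
             || ((List.range n.toNat).any (fun i => pvCell mat i c == 1))) = true
        then 1 else pvCell mat r c := by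
  intro r c
  unfold modify_matrix
  dsimp only
  have hsplit :
      (List.range n.toNat).foldl (fun rc i =>
        (List.range m.toNat).foldl (fun rc j =>
          if ((mat.getD i []).getD j 0) == 1 then (rc.1.set i true, rc.2.set j true) else rc) rc)
        (List.replicate n.toNat false, List.replicate m.toNat false)
      = ((List.range n.toNat).foldl (fun rr i => if (List.range m.toNat).any (fun j => (mat.getD i []).getD j 0 == 1) then rr.set i true else rr) (List.replicate n.toNat false),
         (List.range n.toNat).foldl (fun cc i => (List.range m.toNat).foldl (fun cc j => if (mat.getD i []).getD j 0 == 1 then cc.set j true else cc) cc) (List.replicate m.toNat false)) := by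
    have h1 : (fun (rc : List Bool × List Bool) (i : Nat) =>
        (List.range m.toNat).foldl (fun rc j =>
          if ((mat.getD i []).getD j 0) == 1 then (rc.1.set i true, rc.2.set j true) else rc) rc)
        = fun rc i => ((if (List.range m.toNat).any (fun j => (mat.getD i []).getD j 0 == 1) then rc.1.set i true else rc.1),
            (List.range m.toNat).foldl (fun cc j => if (mat.getD i []).getD j 0 == 1 then cc.set j true else cc) rc.2) := by
      funext rc i
      exact pv_inner_pair _ _ i rc.1 rc.2
    rw [h1]
    exact pv_foldl_prod
      (fun (rr : List Bool) (i : Nat) => if (List.range m.toNat).any (fun j => (mat.getD i []).getD j 0 == 1) then rr.set i true else rr)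
      (fun (cc : List Bool) (i : Nat) => (List.range m.toNat).foldl (fun cc j => if (mat.getD i []).getD j 0 == 1 then cc.set j true else cc) cc)
      (List.range n.toNat) _ _
  rw [hsplit]
  dsimp only
  have hR : ∀ i : Nat,
      ((List.range n.toNat).foldl (fun rr i => if (List.range m.toNat).any (fun j => (mat.getD i []).getD j 0 == 1) then rr.set i true else rr) (List.replicate n.toNat false)).getD i false
      = (decide (i < n.toNat) && (List.range m.toNat).any (fun j => (mat.getD i []).getD j 0 == 1)) := by
    intro i
    rw [pv_foldl_setTrue_getD]
    by_cases h : i < n.toNat <;> simp [h]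
  have hC : ∀ j : Nat,
      ((List.range n.toNat).foldl (fun cc i => (List.range m.toNat).foldl (fun cc j => if (mat.getD i []).getD j 0 == 1 then cc.set j true else cc) cc) (List.replicate m.toNat false)).getD j false
      = (decide (j < m.toNat) && (List.range n.toNat).any (fun i => (mat.getD i []).getD j 0 == 1)) := by
    intro j
    rw [pv_nested_col_getD]
    by_cases h : j < m.toNat <;> simp [h]
  simp only [hR, hC]
  have hpairs := pv_foldl_pairs (fun (acc : List (List Int)) (p : Nat × Nat) =>
      if (decide (p.1 < n.toNat) && (List.range m.toNat).any (fun j => (mat.getD p.1 []).getD j 0 == 1))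
         || (decide (p.2 < m.toNat) && (List.range n.toNat).any (fun i => (mat.getD i []).getD p.2 0 == 1)) then
        acc.set p.1 ((acc.getD p.1 []).set p.2 1)
      else acc) (List.range n.toNat) (List.range m.toNat) mat
  dsimp only at hpairs
  rw [hpairs, pv_cellwrite]
  simp only [pv_exists_pairs, List.mem_range, pv_cell_def]
  apply if_congr _ rfl rfl
  constructor
  · rintro ⟨⟨i, hi, j, hj, hcnd, rfl, rfl⟩, hb1, hb2⟩
    refine ⟨hi, hj, ?_⟩
    simp only [Bool.or_eq_true, Bool.and_eq_true] at hcnd ⊢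
    rcases hcnd with ⟨_, h⟩ | ⟨_, h⟩
    · exact Or.inl h
    · exact Or.inr h
  · rintro ⟨h1, h2, h3⟩
    refine ⟨⟨r, h1, c, h2, ?_, rfl, rfl⟩,
      lt_of_lt_of_le h1 hNlen, lt_of_lt_of_le h2 (hrowlen r h1)⟩
    simp only [Bool.or_eq_true] at h3
    rcases h3 with h | h
    · simp [h1, h]
    · simp [h2, h]

-- ===== characterizations of B's stages =====
theorem pv_mk_shape (N M : Nat) (mat : List (List Int)) :
    (((List.range' 1 (N - 1)).foldl (fun acc i =>
        (List.range' 1 (M - 1)).foldl (fun acc j =>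
          if (acc.getD i []).getD j 0 == 1 then
            (acc.set i ((acc.getD i []).set 0 1)).set 0
              (((acc.set i ((acc.getD i []).set 0 1)).getD 0 []).set j 1)
          else acc) acc) mat)).length = mat.length ∧
    ∀ r, ((((List.range' 1 (N - 1)).foldl (fun acc i =>
        (List.range' 1 (M - 1)).foldl (fun acc j =>
          if (acc.getD i []).getD j 0 == 1 then
            (acc.set i ((acc.getD i []).set 0 1)).set 0
              (((acc.set i ((acc.getD i []).set 0 1)).getD 0 []).set j 1)
          else acc) acc) mat)).getD r []).length = (mat.getD r []).length := by
  refine pv_foldl_shape _ ?_ _ _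
  intro acc i
  refine pv_foldl_shape _ ?_ _ _
  intro acc j
  constructor
  · split
    · simp
    · rfl
  · intro r
    split
    · rw [pv_rowlen_set, pv_rowlen_set]
    · rfl

theorem pv_mk_cell (N M : Nat) (hN : 1 ≤ N) (hM : 1 ≤ M) (mat : List (List Int)) :
    ∀ r c, pvCell ((List.range' 1 (N - 1)).foldl (fun acc i =>
        (List.range' 1 (M - 1)).foldl (fun acc j =>
          if (acc.getD i []).getD j 0 == 1 then
            (acc.set i ((acc.getD i []).set 0 1)).set 0
              (((acc.set i ((acc.getD i []).set 0 1)).getD 0 []).set j 1)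
          else acc) acc) mat) r c
      = if (c = 0 ∧ 1 ≤ r ∧ r < N ∧ ((List.range' 1 (M - 1)).any (fun j => pvCell mat r j == 1)) = true
              ∧ r < mat.length ∧ 0 < (mat.getD r []).length)
          ∨ (r = 0 ∧ 1 ≤ c ∧ c < M ∧ ((List.range' 1 (N - 1)).any (fun i => pvCell mat i c == 1)) = true
              ∧ 0 < mat.length ∧ c < (mat.getD 0 []).length)
        then 1 else pvCell mat r c := by
  intro r c
  have hpairs := pv_foldl_pairs (fun (acc : List (List Int)) (p : Nat × Nat) =>
      if (acc.getD p.1 []).getD p.2 0 == 1 then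
        (acc.set p.1 ((acc.getD p.1 []).set 0 1)).set 0
          (((acc.set p.1 ((acc.getD p.1 []).set 0 1)).getD 0 []).set p.2 1)
      else acc) (List.range' 1 (N - 1)) (List.range' 1 (M - 1)) mat
  dsimp only at hpairs
  rw [hpairs, pv_mark_stable mat _ (pv_pairs_interior N M) mat (fun r c _ _ => rfl),
    pv_markwrite _ _ (pv_pairs_interior N M)]
  apply if_congr _ rfl rfl
  constructor
  · rintro (⟨⟨p, hp, hcnd, hpr⟩, e0, hb1, hb2⟩ | ⟨⟨p, hp, hcnd, hpc⟩, e0, hb1, hb2⟩)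
    · obtain ⟨hpI, hpJ⟩ := (pv_mem_pairs _ _ p).mp hp
      have hI := List.mem_range'_1.mp hpI
      rw [hpr] at hcnd
      refine Or.inl ⟨e0, by omega, by omega, List.any_eq_true.mpr ⟨p.2, hpJ, hcnd⟩, hb1, hb2⟩
    · obtain ⟨hpI, hpJ⟩ := (pv_mem_pairs _ _ p).mp hp
      have hJ := List.mem_range'_1.mp hpJ
      rw [hpc] at hcnd
      refine Or.inr ⟨e0, by omega, by omega, List.any_eq_true.mpr ⟨p.1, hpI, hcnd⟩, hb1, hb2⟩
  · rintro (⟨e0, h1, h2, hany, hb1, hb2⟩ | ⟨e0, h1, h2, hany, hb1, hb2⟩)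
    · obtain ⟨j, hj, hcnd⟩ := List.any_eq_true.mp hany
      exact Or.inl ⟨⟨(r, j), (pv_mem_pairs _ _ _).mpr ⟨List.mem_range'_1.mpr ⟨h1, by omega⟩, hj⟩,
        hcnd, rfl⟩, e0, hb1, hb2⟩
    · obtain ⟨i, hi, hcnd⟩ := List.any_eq_true.mp hany
      exact Or.inr ⟨⟨(i, c), (pv_mem_pairs _ _ _).mpr ⟨hi, List.mem_range'_1.mpr ⟨h1, by omega⟩⟩,
        hcnd, rfl⟩, e0, hb1, hb2⟩

theorem pv_wr_shape (N M : Nat) (X : List (List Int)) :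
    (((List.range' 1 (N - 1)).foldl (fun acc i =>
        (List.range' 1 (M - 1)).foldl (fun acc j =>
          if (acc.getD i []).getD 0 0 == 1 || (acc.getD 0 []).getD j 0 == 1 then
            acc.set i ((acc.getD i []).set j 1)
          else acc) acc) X)).length = X.length ∧
    ∀ r, ((((List.range' 1 (N - 1)).foldl (fun acc i =>
        (List.range' 1 (M - 1)).foldl (fun acc j =>
          if (acc.getD i []).getD 0 0 == 1 || (acc.getD 0 []).getD j 0 == 1 then
            acc.set i ((acc.getD i []).set j 1)
          else acc) acc) X)).getD r []).length = (X.getD r []).length := by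
  refine pv_foldl_shape _ ?_ _ _
  intro acc i
  refine pv_foldl_shape _ ?_ _ _
  intro acc j
  constructor
  · split
    · simp
    · rfl
  · intro r
    split
    · exact pv_rowlen_set acc i j 1 r
    · rfl

theorem pv_wr_cell (N M : Nat) (hN : 1 ≤ N) (hM : 1 ≤ M) (X : List (List Int)) :
    ∀ r c, pvCell ((List.range' 1 (N - 1)).foldl (fun acc i =>
        (List.range' 1 (M - 1)).foldl (fun acc j =>
          if (acc.getD i []).getD 0 0 == 1 || (acc.getD 0 []).getD j 0 == 1 then
            acc.set i ((acc.getD i []).set j 1)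
          else acc) acc) X) r c
      = if 1 ≤ r ∧ r < N ∧ 1 ≤ c ∧ c < M ∧ (pvCell X r 0 == 1 || pvCell X 0 c == 1) = true
            ∧ r < X.length ∧ c < (X.getD r []).length
        then 1 else pvCell X r c := by
  intro r c
  have hpairs := pv_foldl_pairs (fun (acc : List (List Int)) (p : Nat × Nat) =>
      if (acc.getD p.1 []).getD 0 0 == 1 || (acc.getD 0 []).getD p.2 0 == 1 then
        acc.set p.1 ((acc.getD p.1 []).set p.2 1)
      else acc) (List.range' 1 (N - 1)) (List.range' 1 (M - 1)) X
  dsimp only at hpairs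
  rw [hpairs, pv_wr_stable X _ (pv_pairs_interior N M) X (fun r => rfl) (fun c => rfl),
    pv_cellwrite]
  apply if_congr _ rfl rfl
  constructor
  · rintro ⟨⟨p, hp, hcnd, hpr, hpc⟩, hb1, hb2⟩
    obtain ⟨hpI, hpJ⟩ := (pv_mem_pairs _ _ p).mp hp
    have hI := List.mem_range'_1.mp hpI
    have hJ := List.mem_range'_1.mp hpJ
    rw [hpr, hpc] at hcnd
    exact ⟨by omega, by omega, by omega, by omega, hcnd, hb1, hb2⟩
  · rintro ⟨h1, h2, h3, h4, h5, h6, h7⟩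
    exact ⟨⟨(r, c), (pv_mem_pairs _ _ _).mpr ⟨List.mem_range'_1.mpr ⟨h1, by omega⟩,
      List.mem_range'_1.mpr ⟨h3, by omega⟩⟩, h5, rfl, rfl⟩, h6, h7⟩

theorem pv_fillrow_shape (M : Nat) (X : List (List Int)) :
    (((List.range M).foldl (fun acc j => acc.set 0 ((acc.getD 0 []).set j 1)) X)).length = X.length ∧
    ∀ r, ((((List.range M).foldl (fun acc j => acc.set 0 ((acc.getD 0 []).set j 1)) X)).getD r []).length
        = (X.getD r []).length := by
  refine pv_foldl_shape _ ?_ _ _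
  intro acc j
  exact ⟨by simp, fun r => pv_rowlen_set acc 0 j 1 r⟩

theorem pv_fillrow_cell (M : Nat) (X : List (List Int)) :
    ∀ r c, pvCell ((List.range M).foldl (fun acc j => acc.set 0 ((acc.getD 0 []).set j 1)) X) r c
      = if r = 0 ∧ c < M ∧ r < X.length ∧ c < (X.getD r []).length then 1 else pvCell X r c := by
  intro r c
  have hmap : (List.range M).foldl (fun acc j => acc.set 0 ((acc.getD 0 []).set j 1)) X
      = ((List.range M).map (Prod.mk 0)).foldl (fun acc p =>
          if (fun (_ : Nat × Nat) => true) p then acc.set p.1 ((acc.getD p.1 []).set p.2 1) else acc) X := by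
    rw [List.foldl_map]
    simp
  rw [hmap, pv_cellwrite]
  apply if_congr _ rfl rfl
  constructor
  · rintro ⟨⟨p, hp, _, rfl, rfl⟩, hb1, hb2⟩
    obtain ⟨j, hj, rfl⟩ := List.mem_map.mp hp
    exact ⟨rfl, List.mem_range.mp hj, hb1, hb2⟩
  · rintro ⟨rfl, h2, hb1, hb2⟩
    exact ⟨⟨(0, c), List.mem_map.mpr ⟨c, List.mem_range.mpr h2, rfl⟩, rfl, rfl, rfl⟩, hb1, hb2⟩

theorem pv_fillcol_shape (N : Nat) (X : List (List Int)) :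
    (((List.range N).foldl (fun acc i => acc.set i ((acc.getD i []).set 0 1)) X)).length = X.length ∧
    ∀ r, ((((List.range N).foldl (fun acc i => acc.set i ((acc.getD i []).set 0 1)) X)).getD r []).length
        = (X.getD r []).length := by
  refine pv_foldl_shape _ ?_ _ _
  intro acc i
  exact ⟨by simp, fun r => pv_rowlen_set acc i 0 1 r⟩

theorem pv_fillcol_cell (N : Nat) (X : List (List Int)) :
    ∀ r c, pvCell ((List.range N).foldl (fun acc i => acc.set i ((acc.getD i []).set 0 1)) X) r c
      = if r < N ∧ c = 0 ∧ r < X.length ∧ c < (X.getD r []).length then 1 else pvCell X r c := by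
  intro r c
  have hmap : (List.range N).foldl (fun acc i => acc.set i ((acc.getD i []).set 0 1)) X
      = ((List.range N).map (fun i => (i, 0))).foldl (fun acc p =>
          if (fun (_ : Nat × Nat) => true) p then acc.set p.1 ((acc.getD p.1 []).set p.2 1) else acc) X := by
    rw [List.foldl_map]
    simp
  rw [hmap, pv_cellwrite]
  apply if_congr _ rfl rfl
  constructor
  · rintro ⟨⟨p, hp, _, rfl, rfl⟩, hb1, hb2⟩
    obtain ⟨i, hi, rfl⟩ := List.mem_map.mp hp
    exact ⟨List.mem_range.mp hi, rfl, hb1, hb2⟩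
  · rintro ⟨h1, rfl, hb1, hb2⟩
    exact ⟨⟨(r, 0), List.mem_map.mpr ⟨r, List.mem_range.mpr h1, rfl⟩, rfl, rfl, rfl⟩, hb1, hb2⟩

theorem pv_B_shape (mat : List (List Int)) (n m : Int) :
    (modify_matrix_alt mat n m).length = mat.length ∧
    ∀ r, ((modify_matrix_alt mat n m).getD r []).length = (mat.getD r []).length := by
  unfold modify_matrix_alt
  by_cases hg : (decide (n ≤ 0) || decide (m ≤ 0)) = true
  · rw [if_pos hg]
    exact ⟨rfl, fun r => rfl⟩
  · rw [if_neg hg]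
    dsimp only
    by_cases hfc : ((List.range n.toNat).any (fun i => (mat.getD i []).getD 0 0 == 1)) = true <;>
      by_cases hfr : ((List.range m.toNat).any (fun j => (mat.getD 0 []).getD j 0 == 1)) = true <;>
      simp only [hfc, hfr, if_true, if_false, Bool.false_eq_true] <;>
      constructor <;>
      first
      | (rw [(pv_fillcol_shape _ _).1, (pv_fillrow_shape _ _).1, (pv_wr_shape _ _ _).1, (pv_mk_shape _ _ _).1])
      | (intro r; rw [(pv_fillcol_shape _ _).2, (pv_fillrow_shape _ _).2, (pv_wr_shape _ _ _).2, (pv_mk_shape _ _ _).2])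
      | (rw [(pv_fillcol_shape _ _).1, (pv_wr_shape _ _ _).1, (pv_mk_shape _ _ _).1])
      | (intro r; rw [(pv_fillcol_shape _ _).2, (pv_wr_shape _ _ _).2, (pv_mk_shape _ _ _).2])
      | (rw [(pv_fillrow_shape _ _).1, (pv_wr_shape _ _ _).1, (pv_mk_shape _ _ _).1])
      | (intro r; rw [(pv_fillrow_shape _ _).2, (pv_wr_shape _ _ _).2, (pv_mk_shape _ _ _).2])
      | (rw [(pv_wr_shape _ _ _).1, (pv_mk_shape _ _ _).1])
      | (intro r; rw [(pv_wr_shape _ _ _).2, (pv_mk_shape _ _ _).2])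



-- ((if P then 1 else v) == 1) as a Bool disjunction
theorem pv_ite_beq_one (P : Prop) [Decidable P] (v : Int) :
    ((if P then (1 : Int) else v) == 1) = (decide P || (v == 1)) := by
  by_cases h : P <;> simp [h]

theorem pv_B_cell (mat : List (List Int)) (n m : Int) (hn : 0 < n) (hm : 0 < m)
    (hNlen : n.toNat ≤ mat.length)
    (hrowlen : ∀ r, r < n.toNat → m.toNat ≤ (mat.getD r []).length) :
    ∀ r c, pvCell (modify_matrix_alt mat n m) r c
      = if r < n.toNat ∧ c < m.toNat ∧
           (((List.range m.toNat).any (fun j => pvCell mat r j == 1))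
             || ((List.range n.toNat).any (fun i => pvCell mat i c == 1))) = true
        then 1 else pvCell mat r c := by
  have hN1 : 1 ≤ n.toNat := by omega
  have hM1 : 1 ≤ m.toNat := by omega
  have hRowIff : ∀ r', (((List.range m.toNat).any (fun j => pvCell mat r' j == 1)) = true)
      ↔ (((pvCell mat r' 0 == 1) = true) ∨ (((List.range' 1 (m.toNat - 1)).any (fun j => pvCell mat r' j == 1)) = true)) := by
    intro r'
    rw [pv_range_any_split m.toNat hM1]
    exact iff_of_eq (Bool.or_eq_true _ _)
  have hColIff : ∀ c', (((List.range n.toNat).any (fun i => pvCell mat i c' == 1)) = true)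
      ↔ (((pvCell mat 0 c' == 1) = true) ∨ (((List.range' 1 (n.toNat - 1)).any (fun i => pvCell mat i c' == 1)) = true)) := by
    intro c'
    rw [pv_range_any_split n.toNat hN1]
    exact iff_of_eq (Bool.or_eq_true _ _)
  have hRow0 : ∀ r' c', c' < m.toNat → (pvCell mat r' c' == 1) = true →
      ((List.range m.toNat).any (fun j => pvCell mat r' j == 1)) = true := by
    intro r' c' h2 hc
    exact List.any_eq_true.mpr ⟨c', List.mem_range.mpr h2, hc⟩
  have hCol0 : ∀ r' c', r' < n.toNat → (pvCell mat r' c' == 1) = true →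
      ((List.range n.toNat).any (fun i => pvCell mat i c' == 1)) = true := by
    intro r' c' h1 hc
    exact List.any_eq_true.mpr ⟨r', List.mem_range.mpr h1, hc⟩
  intro r c
  unfold modify_matrix_alt
  rw [if_neg (by simp only [Bool.or_eq_true, decide_eq_true_eq]; omega)]
  dsimp only
  by_cases hfc : ((List.range n.toNat).any fun i => (mat.getD i []).getD 0 0 == 1) = true
  · rw [if_pos hfc]
    simp only [pv_cell_def] at hfc
    by_cases hfr : ((List.range m.toNat).any fun j => (mat.getD 0 []).getD j 0 == 1) = true
    · rw [if_pos hfr]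
      simp only [pv_cell_def] at hfr
      simp only [pv_fillcol_cell, pv_fillrow_cell, pv_wr_cell _ _ hN1 hM1,
        pv_mk_cell _ _ hN1 hM1, pv_fillrow_shape, pv_wr_shape, pv_mk_shape,
        pv_ite_beq_one, pv_ite_or]
      apply if_congr _ rfl rfl
      constructor
      · rintro (⟨h1, rfl, hb1, hb2⟩ | ⟨rfl, h2, hb1, hb2⟩ | ⟨h1', h1, hc', h2, hcnd, hb1, hb2⟩ | hmk)
        · exact ⟨h1, by omega, by simp only [Bool.or_eq_true]; exact Or.inr hfc⟩
        · exact ⟨by omega, h2, by simp only [Bool.or_eq_true]; exact Or.inl hfr⟩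
        · refine ⟨h1, h2, ?_⟩
          simp only [Bool.or_eq_true] at hcnd ⊢
          rcases hcnd with (hd | hv) | (hd | hv)
          · rcases of_decide_eq_true hd with ⟨_, _, _, hany, _, _⟩ | ⟨_, hfalse, _⟩
            · exact Or.inl ((hRowIff r).mpr (Or.inr hany))
            · first
              | exact hfalse.elim
              | omega
          · exact Or.inl ((hRowIff r).mpr (Or.inl hv))
          · rcases of_decide_eq_true hd with ⟨_, hfalse, _⟩ | ⟨_, _, _, hany, _, _⟩
            · first
              | exact hfalse.elim
              | omega
            · exact Or.inr ((hColIff c).mpr (Or.inr hany))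
          · exact Or.inr ((hColIff c).mpr (Or.inl hv))
        · rcases hmk with ⟨rfl, h1, h2, hany, hb1, hb2⟩ | ⟨rfl, h1, h2, hany, hb1, hb2⟩
          · exact ⟨h2, by omega, by simp only [Bool.or_eq_true]; exact Or.inl ((hRowIff r).mpr (Or.inr hany))⟩
          · exact ⟨by omega, h2, by simp only [Bool.or_eq_true]; exact Or.inr ((hColIff c).mpr (Or.inr hany))⟩
      · rintro ⟨h1, h2, hrc⟩
        simp only [Bool.or_eq_true] at hrc
        by_cases hr0 : r = 0
        · subst hr0
          have hbr := hrowlen 0 (by omega)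
          exact Or.inr (Or.inl ⟨rfl, h2, by omega, by omega⟩)
        · by_cases hc0 : c = 0
          · subst hc0
            have hbr := hrowlen r h1
            exact Or.inl ⟨h1, rfl, by omega, by omega⟩
          · have hbr := hrowlen r h1
            have hbr0 := hrowlen 0 (by omega)
            refine Or.inr (Or.inr (Or.inl ⟨by omega, h1, by omega, h2, ?_, by omega, by omega⟩))
            simp only [Bool.or_eq_true]
            rcases hrc with hR | hC
            · rcases (hRowIff r).mp hR with hv | hany
              · exact Or.inl (Or.inr hv)
              · exact Or.inl (Or.inl (decide_eq_true (Or.inl ⟨by trivial, by omega, h1, hany, by omega, by omega⟩)))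
            · rcases (hColIff c).mp hC with hv | hany
              · exact Or.inr (Or.inr hv)
              · exact Or.inr (Or.inl (decide_eq_true (Or.inr ⟨by trivial, by omega, h2, hany, by omega, by omega⟩)))
    · rw [if_neg hfr]
      have hfr0 : ((List.range m.toNat).any fun j => pvCell mat 0 j == 1) = false := by
        simp only [pv_cell_def] at hfr
        exact Bool.eq_false_iff.mpr hfr
      simp only [pv_fillcol_cell, pv_wr_cell _ _ hN1 hM1,
        pv_mk_cell _ _ hN1 hM1, pv_wr_shape, pv_mk_shape,
        pv_ite_beq_one, pv_ite_or]
      apply if_congr _ rfl rfl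
      constructor
      · rintro (⟨h1, rfl, hb1, hb2⟩ | ⟨h1', h1, hc', h2, hcnd, hb1, hb2⟩ | hmk)
        · exact ⟨h1, by omega, by simp only [Bool.or_eq_true]; exact Or.inr hfc⟩
        · refine ⟨h1, h2, ?_⟩
          simp only [Bool.or_eq_true] at hcnd ⊢
          rcases hcnd with (hd | hv) | (hd | hv)
          · rcases of_decide_eq_true hd with ⟨_, _, _, hany, _, _⟩ | ⟨_, hfalse, _⟩
            · exact Or.inl ((hRowIff r).mpr (Or.inr hany))
            · first
              | exact hfalse.elim
              | omega
          · exact Or.inl ((hRowIff r).mpr (Or.inl hv))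
          · rcases of_decide_eq_true hd with ⟨_, hfalse, _⟩ | ⟨_, _, _, hany, _, _⟩
            · first
              | exact hfalse.elim
              | omega
            · exact Or.inr ((hColIff c).mpr (Or.inr hany))
          · exact Or.inr ((hColIff c).mpr (Or.inl hv))
        · rcases hmk with ⟨rfl, h1, h2, hany, hb1, hb2⟩ | ⟨rfl, h1, h2, hany, hb1, hb2⟩
          · exact ⟨h2, by omega, by simp only [Bool.or_eq_true]; exact Or.inl ((hRowIff r).mpr (Or.inr hany))⟩
          · exact ⟨by omega, h2, by simp only [Bool.or_eq_true]; exact Or.inr ((hColIff c).mpr (Or.inr hany))⟩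
      · rintro ⟨h1, h2, hrc⟩
        simp only [Bool.or_eq_true] at hrc
        by_cases hr0 : r = 0
        · subst hr0
          have hbr0 := hrowlen 0 (by omega)
          rcases hrc with hR | hC
          · rw [hfr0] at hR
            exact absurd hR Bool.false_ne_true
          · rcases (hColIff c).mp hC with hv | hany
            · have hcontra := hRow0 0 c h2 hv
              rw [hfr0] at hcontra
              exact absurd hcontra Bool.false_ne_true
            · by_cases hc0 : c = 0
              · subst hc0
                exact Or.inl ⟨by omega, rfl, by omega, by omega⟩
              · exact Or.inr (Or.inr (Or.inr ⟨rfl, by omega, h2, hany, by omega, by omega⟩))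
        · by_cases hc0 : c = 0
          · subst hc0
            have hbr := hrowlen r h1
            exact Or.inl ⟨h1, rfl, by omega, by omega⟩
          · have hbr := hrowlen r h1
            have hbr0 := hrowlen 0 (by omega)
            refine Or.inr (Or.inl ⟨by omega, h1, by omega, h2, ?_, by omega, by omega⟩)
            simp only [Bool.or_eq_true]
            rcases hrc with hR | hC
            · rcases (hRowIff r).mp hR with hv | hany
              · exact Or.inl (Or.inr hv)
              · exact Or.inl (Or.inl (decide_eq_true (Or.inl ⟨by trivial, by omega, h1, hany, by omega, by omega⟩)))
            · rcases (hColIff c).mp hC with hv | hany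
              · exact Or.inr (Or.inr hv)
              · exact Or.inr (Or.inl (decide_eq_true (Or.inr ⟨by trivial, by omega, h2, hany, by omega, by omega⟩)))
  · rw [if_neg hfc]
    have hfc0 : ((List.range n.toNat).any fun i => pvCell mat i 0 == 1) = false := by
      simp only [pv_cell_def] at hfc
      exact Bool.eq_false_iff.mpr hfc
    by_cases hfr : ((List.range m.toNat).any fun j => (mat.getD 0 []).getD j 0 == 1) = true
    · rw [if_pos hfr]
      simp only [pv_cell_def] at hfr
      simp only [pv_fillrow_cell, pv_wr_cell _ _ hN1 hM1,
        pv_mk_cell _ _ hN1 hM1, pv_wr_shape, pv_mk_shape,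
        pv_ite_beq_one, pv_ite_or]
      apply if_congr _ rfl rfl
      constructor
      · rintro (⟨rfl, h2, hb1, hb2⟩ | ⟨h1', h1, hc', h2, hcnd, hb1, hb2⟩ | hmk)
        · exact ⟨by omega, h2, by simp only [Bool.or_eq_true]; exact Or.inl hfr⟩
        · refine ⟨h1, h2, ?_⟩
          simp only [Bool.or_eq_true] at hcnd ⊢
          rcases hcnd with (hd | hv) | (hd | hv)
          · rcases of_decide_eq_true hd with ⟨_, _, _, hany, _, _⟩ | ⟨_, hfalse, _⟩
            · exact Or.inl ((hRowIff r).mpr (Or.inr hany))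
            · first
              | exact hfalse.elim
              | omega
          · exact Or.inl ((hRowIff r).mpr (Or.inl hv))
          · rcases of_decide_eq_true hd with ⟨_, hfalse, _⟩ | ⟨_, _, _, hany, _, _⟩
            · first
              | exact hfalse.elim
              | omega
            · exact Or.inr ((hColIff c).mpr (Or.inr hany))
          · exact Or.inr ((hColIff c).mpr (Or.inl hv))
        · rcases hmk with ⟨rfl, h1, h2, hany, hb1, hb2⟩ | ⟨rfl, h1, h2, hany, hb1, hb2⟩
          · exact ⟨h2, by omega, by simp only [Bool.or_eq_true]; exact Or.inl ((hRowIff r).mpr (Or.inr hany))⟩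
          · exact ⟨by omega, h2, by simp only [Bool.or_eq_true]; exact Or.inr ((hColIff c).mpr (Or.inr hany))⟩
      · rintro ⟨h1, h2, hrc⟩
        simp only [Bool.or_eq_true] at hrc
        by_cases hr0 : r = 0
        · subst hr0
          have hbr0 := hrowlen 0 (by omega)
          exact Or.inl ⟨rfl, h2, by omega, by omega⟩
        · by_cases hc0 : c = 0
          · subst hc0
            have hbr := hrowlen r h1
            rcases hrc with hR | hC
            · rcases (hRowIff r).mp hR with hv | hany
              · have hcontra := hCol0 r 0 h1 hv
                rw [hfc0] at hcontra
                exact absurd hcontra Bool.false_ne_true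
              · exact Or.inr (Or.inr (Or.inl ⟨rfl, by omega, h1, hany, by omega, by omega⟩))
            · rw [hfc0] at hC
              exact absurd hC Bool.false_ne_true
          · have hbr := hrowlen r h1
            have hbr0 := hrowlen 0 (by omega)
            refine Or.inr (Or.inl ⟨by omega, h1, by omega, h2, ?_, by omega, by omega⟩)
            simp only [Bool.or_eq_true]
            rcases hrc with hR | hC
            · rcases (hRowIff r).mp hR with hv | hany
              · exact Or.inl (Or.inr hv)
              · exact Or.inl (Or.inl (decide_eq_true (Or.inl ⟨by trivial, by omega, h1, hany, by omega, by omega⟩)))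
            · rcases (hColIff c).mp hC with hv | hany
              · exact Or.inr (Or.inr hv)
              · exact Or.inr (Or.inl (decide_eq_true (Or.inr ⟨by trivial, by omega, h2, hany, by omega, by omega⟩)))
    · rw [if_neg hfr]
      have hfr0 : ((List.range m.toNat).any fun j => pvCell mat 0 j == 1) = false := by
        simp only [pv_cell_def] at hfr
        exact Bool.eq_false_iff.mpr hfr
      simp only [pv_wr_cell _ _ hN1 hM1, pv_mk_cell _ _ hN1 hM1, pv_mk_shape,
        pv_ite_beq_one, pv_ite_or]
      apply if_congr _ rfl rfl
      constructor
      · rintro (⟨h1', h1, hc', h2, hcnd, hb1, hb2⟩ | hmk)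
        · refine ⟨h1, h2, ?_⟩
          simp only [Bool.or_eq_true] at hcnd ⊢
          rcases hcnd with (hd | hv) | (hd | hv)
          · rcases of_decide_eq_true hd with ⟨_, _, _, hany, _, _⟩ | ⟨_, hfalse, _⟩
            · exact Or.inl ((hRowIff r).mpr (Or.inr hany))
            · first
              | exact hfalse.elim
              | omega
          · exact Or.inl ((hRowIff r).mpr (Or.inl hv))
          · rcases of_decide_eq_true hd with ⟨_, hfalse, _⟩ | ⟨_, _, _, hany, _, _⟩
            · first
              | exact hfalse.elim
              | omega
            · exact Or.inr ((hColIff c).mpr (Or.inr hany))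
          · exact Or.inr ((hColIff c).mpr (Or.inl hv))
        · rcases hmk with ⟨rfl, h1, h2, hany, hb1, hb2⟩ | ⟨rfl, h1, h2, hany, hb1, hb2⟩
          · exact ⟨h2, by omega, by simp only [Bool.or_eq_true]; exact Or.inl ((hRowIff r).mpr (Or.inr hany))⟩
          · exact ⟨by omega, h2, by simp only [Bool.or_eq_true]; exact Or.inr ((hColIff c).mpr (Or.inr hany))⟩
      · rintro ⟨h1, h2, hrc⟩
        simp only [Bool.or_eq_true] at hrc
        by_cases hr0 : r = 0
        · subst hr0
          have hbr0 := hrowlen 0 (by omega)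
          rcases hrc with hR | hC
          · rw [hfr0] at hR
            exact absurd hR Bool.false_ne_true
          · by_cases hc0 : c = 0
            · subst hc0
              rw [hfc0] at hC
              exact absurd hC Bool.false_ne_true
            · rcases (hColIff c).mp hC with hv | hany
              · have hcontra := hRow0 0 c h2 hv
                rw [hfr0] at hcontra
                exact absurd hcontra Bool.false_ne_true
              · exact Or.inr (Or.inr ⟨rfl, by omega, h2, hany, by omega, by omega⟩)
        · by_cases hc0 : c = 0
          · subst hc0
            have hbr := hrowlen r h1
            rcases hrc with hR | hC
            · rcases (hRowIff r).mp hR with hv | hany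
              · have hcontra := hCol0 r 0 h1 hv
                rw [hfc0] at hcontra
                exact absurd hcontra Bool.false_ne_true
              · exact Or.inr (Or.inl ⟨rfl, by omega, h1, hany, by omega, by omega⟩)
            · rw [hfc0] at hC
              exact absurd hC Bool.false_ne_true
          · have hbr := hrowlen r h1
            have hbr0 := hrowlen 0 (by omega)
            refine Or.inl ⟨by omega, h1, by omega, h2, ?_, by omega, by omega⟩
            simp only [Bool.or_eq_true]
            rcases hrc with hR | hC
            · rcases (hRowIff r).mp hR with hv | hany
              · exact Or.inl (Or.inr hv)
              · exact Or.inl (Or.inl (decide_eq_true (Or.inl ⟨by trivial, by omega, h1, hany, by omega, by omega⟩)))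
            · rcases (hColIff c).mp hC with hv | hany
              · exact Or.inr (Or.inr hv)
              · exact Or.inr (Or.inl (decide_eq_true (Or.inr ⟨by trivial, by omega, h2, hany, by omega, by omega⟩)))


-- ===== VERDICT (by name: the statement is the Claim_ definition above) =====
theorem modify_matrix_spec : Claim_equal_modify_matrix := by
  intro mat n m _ hpre
  unfold Spec_modify_matrix
  by_cases hdeg : 0 < n ∧ 0 < m
  · obtain ⟨hn, hm⟩ := hdeg
    obtain ⟨hlen, hrows⟩ := hpre hn hm
    have hNlen : n.toNat ≤ mat.length := by omega
    have hrowlen : ∀ r, r < n.toNat → m.toNat ≤ (mat.getD r []).length := by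
      intro r hr
      have hrl : r < mat.length := by omega
      have hmem : mat.getD r [] ∈ mat.take n.toNat := by
        rw [List.getD_eq_getElem?_getD, List.getElem?_eq_getElem hrl]
        simp only [Option.getD_some]
        exact List.mem_take_iff_getElem.mpr ⟨r, by omega, by simp⟩
      have := hrows _ hmem
      omega
    have hAs := pv_A_shape mat n m
    have hBs := pv_B_shape mat n m
    refine pv_eq_of_cell _ _ (hAs.1.trans hBs.1.symm) (fun r => (hAs.2 r).trans (hBs.2 r).symm) ?_
    intro r c
    rw [pv_A_cell mat n m hn hm hNlen hrowlen r c, pv_B_cell mat n m hn hm hNlen hrowlen r c]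
  · have hB : modify_matrix_alt mat n m = mat := by
      unfold modify_matrix_alt
      rw [if_pos (by simp only [Bool.or_eq_true, decide_eq_true_eq]; omega)]
    rw [hB]
    unfold modify_matrix
    dsimp only
    rcases (by omega : n.toNat = 0 ∨ m.toNat = 0) with h | h <;> simp [h]
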